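-- pv_equiv track=rewrite | github.com/abinayac24/ai-interview-system | app.py | evaluate_keyword_answer
-- ===== SOURCE A (Python) =====
-- def evaluate_keyword_answer(question, answer, keywords):
--
--     clean_answer = (answer or "").strip().lower()
--     normalized_keywords = [k.strip() for k in (keywords or []) if k.strip()]
--
--     if not normalized_keywords:
--         return "Score: 0\nFeedback: No keywords were configured for this company question."
--
--     matched = [k for k in normalized_keywords if k.lower() in clean_answer]
--     missing = [k for k in normalized_keywords if k not in matched]
--     score = int(round((len(matched) / len(normalized_keywords)) * 10))
--
--     feedback = f"Matched {len(matched)} of {len(normalized_keywords)} keywords."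
--     if missing:
--         feedback += f" Missing keywords: {', '.join(missing[:5])}."
--
--     return f"Score: {score}\nFeedback: {feedback}"
-- ===== SOURCE B (Python) =====
-- def evaluate_keyword_answer(question, answer, keywords):
--
--     clean_answer = (answer or "").strip().lower()
--
--     total = 0
--     hits = 0
--     missing = []
--     for raw in (keywords or []):
--         k = raw.strip()
--         if not k:
--             continue
--         total += 1
--         if k.lower() in clean_answer:
--             hits += 1
--         else:
--             missing.append(k)
--
--     if total == 0:
--         return "Score: 0\nFeedback: No keywords were configured for this company question."
--
--     score = int(round((hits / total) * 10))
--
--     feedback = f"Matched {hits} of {total} keywords."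
--     if missing:
--         feedback += f" Missing keywords: {', '.join(missing[:5])}."
--
--     return f"Score: {score}\nFeedback: {feedback}"
-- ===== Notes on version B (the rewrite author's own statement) =====
-- stated objective: faster
-- what changed: A materializes a normalized keyword list and then builds matched and missing in two further comprehension passes, the second rescanning the matched list for every keyword; B never builds a normalized or matched list at all: one fused pass strips each raw keyword and maintains only a total counter, a hit counter and the missing accumulator, deriving the score from the counters.
import Mathlib
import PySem

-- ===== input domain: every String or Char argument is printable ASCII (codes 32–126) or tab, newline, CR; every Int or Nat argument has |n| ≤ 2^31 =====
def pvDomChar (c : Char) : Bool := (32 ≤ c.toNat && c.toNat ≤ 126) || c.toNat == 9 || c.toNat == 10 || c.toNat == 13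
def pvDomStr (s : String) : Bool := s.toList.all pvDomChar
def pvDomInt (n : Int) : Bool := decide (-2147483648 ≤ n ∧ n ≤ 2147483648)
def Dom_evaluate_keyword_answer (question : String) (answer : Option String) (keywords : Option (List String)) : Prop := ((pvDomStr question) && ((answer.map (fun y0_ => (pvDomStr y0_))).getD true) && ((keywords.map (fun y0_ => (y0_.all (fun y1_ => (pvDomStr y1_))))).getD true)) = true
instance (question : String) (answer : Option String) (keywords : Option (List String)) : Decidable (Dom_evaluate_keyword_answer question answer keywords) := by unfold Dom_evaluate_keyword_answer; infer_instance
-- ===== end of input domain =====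

-- ===== PORT A =====
-- B replaces A's normalized/matched/missing list pipeline (three passes, with an inner
-- 'k not in matched' rescan) by one fused pass keeping only counters and the missing list.
-- Shared hand-ported helper for Python's  int(round((m/n)*10))  (floats are outside PySem):
-- pvFl rounds the nonnegative rational p/q to the nearest IEEE-754 double (ties to even),
-- returned as an exact rational; pvScore10 m n = int(round((m/n)*10)) exactly, for 0 <= m, 0 < q.
def pvDivHalfEven (a b : Nat) : Nat :=
  let q := a / b
  let r := a % b
  if 2 * r > b || (2 * r == b && q % 2 == 1) then q + 1 else q

def pvFl (p q : Nat) : Nat × Nat :=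
  if p = 0 then (0, 1) else
  let d : Int := ((Nat.log2 p : Int) + 1) - ((Nat.log2 q : Int) + 1)
  let ge : Bool := if 0 ≤ d then decide (q <<< d.toNat ≤ p) else decide (q ≤ p <<< (-d).toNat)
  let E : Int := if ge then d else d - 1
  let sh : Int := 52 - E
  let s : Nat := if 0 ≤ sh then pvDivHalfEven (p <<< sh.toNat) q else pvDivHalfEven p (q <<< (-sh).toNat)
  let e : Int := E - 52
  if 0 ≤ e then (s <<< e.toNat, 1) else (s, 1 <<< (-e).toNat)

def pvScore10 (m n : Nat) : Nat :=
  let ab := pvFl m n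
  let cd := pvFl (10 * ab.1) ab.2
  pvDivHalfEven cd.1 cd.2

def evaluate_keyword_answer (question : String) (answer : Option String) (keywords : Option (List String)) : String :=
  let clean_answer := PySem.Str.lower (PySem.Str.strip (answer.getD ""))
  let normalized_keywords := ((keywords.getD []).map (fun k => PySem.Str.strip k)).filter (fun k => k ≠ "")
  if normalized_keywords = [] then
    "Score: 0
Feedback: No keywords were configured for this company question."
  else
    let matched := normalized_keywords.filter (fun k => PySem.Str.isIn (PySem.Str.lower k) clean_answer)
    let missing := normalized_keywords.filter (fun k => !(matched.contains k))
    let score := pvScore10 matched.length normalized_keywords.length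
    let feedback := "Matched " ++ PySem.Int.toStr matched.length ++ " of " ++
      PySem.Int.toStr normalized_keywords.length ++ " keywords."
    let feedback := if missing = [] then feedback else
      feedback ++ " Missing keywords: " ++ PySem.Str.join ", " (missing.take 5) ++ "."
    "Score: " ++ PySem.Int.toStr score ++ "
Feedback: " ++ feedback

-- ===== PORT B =====
-- One fused pass over the raw keywords: strip, skip empties, count total and hits,
-- accumulate only the missing keywords; no normalized or matched list is ever built.
def evaluate_keyword_answer_alt (question : String) (answer : Option String) (keywords : Option (List String)) : String :=
  let clean_answer := PySem.Str.lower (PySem.Str.strip (answer.getD ""))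
  let st := (keywords.getD []).foldl
    (fun (acc : Nat × Nat × List String) raw =>
      let k := PySem.Str.strip raw
      if k = "" then acc
      else if PySem.Str.isIn (PySem.Str.lower k) clean_answer then (acc.1 + 1, acc.2.1 + 1, acc.2.2)
      else (acc.1 + 1, acc.2.1, acc.2.2 ++ [k])) (0, 0, [])
  let total := st.1
  let hits := st.2.1
  let missing := st.2.2
  if total = 0 then
    "Score: 0
Feedback: No keywords were configured for this company question."
  else
    let score := pvScore10 hits total
    let feedback := "Matched " ++ PySem.Int.toStr hits ++ " of " ++
      PySem.Int.toStr total ++ " keywords."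
    let feedback := if missing = [] then feedback else
      feedback ++ " Missing keywords: " ++ PySem.Str.join ", " (missing.take 5) ++ "."
    "Score: " ++ PySem.Int.toStr score ++ "
Feedback: " ++ feedback

-- ===== PRECONDITION & SPEC =====
def Spec_evaluate_keyword_answer (question : String) (answer : Option String) (keywords : Option (List String)) (out : String) : Prop := out = evaluate_keyword_answer_alt question answer keywords
instance (question : String) (answer : Option String) (keywords : Option (List String)) (out : String) : Decidable (Spec_evaluate_keyword_answer question answer keywords out) := by unfold Spec_evaluate_keyword_answer; infer_instance

-- ===== CLAIM (what is proved, stated in full; the proofs are below) =====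
def Claim_equal_evaluate_keyword_answer : Prop := ∀ (question : String) (answer : Option String) (keywords : Option (List String)), Dom_evaluate_keyword_answer question answer keywords → Spec_evaluate_keyword_answer question answer keywords (evaluate_keyword_answer question answer keywords)

-- ===== LEMMAS AND PROOFS =====

-- B's fused fold computes (length, matched-count, missing-list) of the stripped, nonempty keywords.
theorem pv_fold_inv (p : String → Bool) (ks : List String) (t h : Nat) (ms : List String) :
    ks.foldl
      (fun (acc : Nat × Nat × List String) raw =>
        if PySem.Str.strip raw = "" then acc
        else if p (PySem.Str.strip raw) then (acc.1 + 1, acc.2.1 + 1, acc.2.2)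
        else (acc.1 + 1, acc.2.1, acc.2.2 ++ [PySem.Str.strip raw])) (t, h, ms)
    = (t + ((ks.map PySem.Str.strip).filter (fun k => k ≠ "")).length,
       h + ((((ks.map PySem.Str.strip).filter (fun k => k ≠ "")).filter p).length),
       ms ++ ((ks.map PySem.Str.strip).filter (fun k => k ≠ "")).filter (fun k => !p k)) := by
  induction ks generalizing t h ms with
  | nil => simp
  | cons raw rest ih =>
    by_cases he : PySem.Str.strip raw = ""
    · simp [List.foldl_cons, he, ih]
    · by_cases hp : p (PySem.Str.strip raw) = true
      · simp [List.foldl_cons, he, hp, ih]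
        omega
      · simp [List.foldl_cons, he, hp, ih]
        omega

-- A's 'k not in matched' rescan is the complement predicate.
theorem pv_missing_eq {α : Type} [DecidableEq α] (p : α → Bool) (l : List α) :
    l.filter (fun k => !((l.filter p).contains k)) = l.filter (fun k => !p k) := by
  apply List.filter_congr
  intro k hk
  by_cases h : p k = true
  · simp [List.mem_filter, hk, h]
  · simp [List.mem_filter, h]

-- ===== VERDICT (by name: the statement is the Claim_ definition above) =====
theorem evaluate_keyword_answer_spec : Claim_equal_evaluate_keyword_answer := by
  intro question answer keywords _
  unfold Spec_evaluate_keyword_answer evaluate_keyword_answer evaluate_keyword_answer_alt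
  simp only []
  rw [pv_fold_inv (fun k => PySem.Str.isIn (PySem.Str.lower k)
      (PySem.Str.lower (PySem.Str.strip (answer.getD ""))))]
  rw [pv_missing_eq]
  simp only [Nat.zero_add, List.nil_append]
  by_cases hL : ((keywords.getD []).map (fun k => PySem.Str.strip k)).filter (fun k => k ≠ "") = []
  · rw [if_pos hL, if_pos (by rw [hL]; rfl)]
  · rw [if_neg hL, if_neg (fun h => hL (List.length_eq_zero_iff.mp h))]
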